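-- pv_equiv track=rewrite | github.com/hideosugimoto/knowledge-asset-tool | scripts/check_consistency.py | _build_line_mapping
-- ===== SOURCE A (Python) =====
-- def _build_line_mapping(
--     raw_lines: list[str], cleaned_lines: list[str]
-- ) -> list[int]:
--     """cleaned_lines の各インデックスを raw_lines の行番号(1-based)にマッピングする。"""
--     mapping: list[int] = []
--     raw_idx = 0
--
--     for cleaned_line in cleaned_lines:
--         while raw_idx < len(raw_lines):
--             if raw_lines[raw_idx] == cleaned_line:
--                 mapping.append(raw_idx + 1)  # 1-based
--                 raw_idx += 1
--                 break
--             raw_idx += 1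
--         else:
--             # フォールバック: マッピングできない場合は 0
--             mapping.append(0)
--
--     return mapping
-- ===== SOURCE B (Python) =====
-- def _build_line_mapping(
--     raw_lines: list[str], cleaned_lines: list[str]
-- ) -> list[int]:
--     """Greedy subsequence match: one pass over raw_lines, advancing a cursor into cleaned_lines."""
--     mapping = [0] * len(cleaned_lines)
--     c = 0
--     for i, line in enumerate(raw_lines):
--         if c < len(cleaned_lines) and line == cleaned_lines[c]:
--             mapping[c] = i + 1
--             c += 1
--     return mapping
-- ===== Notes on version B (the rewrite author's own statement) =====
-- stated objective: simpler
-- what changed: Replaces the outer loop over cleaned_lines with a nested resuming while-scan of raw_lines by a single for-loop over raw_lines that advances a cursor into cleaned_lines (greedy subsequence match) and fills a preallocated zero list.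
import Mathlib
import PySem

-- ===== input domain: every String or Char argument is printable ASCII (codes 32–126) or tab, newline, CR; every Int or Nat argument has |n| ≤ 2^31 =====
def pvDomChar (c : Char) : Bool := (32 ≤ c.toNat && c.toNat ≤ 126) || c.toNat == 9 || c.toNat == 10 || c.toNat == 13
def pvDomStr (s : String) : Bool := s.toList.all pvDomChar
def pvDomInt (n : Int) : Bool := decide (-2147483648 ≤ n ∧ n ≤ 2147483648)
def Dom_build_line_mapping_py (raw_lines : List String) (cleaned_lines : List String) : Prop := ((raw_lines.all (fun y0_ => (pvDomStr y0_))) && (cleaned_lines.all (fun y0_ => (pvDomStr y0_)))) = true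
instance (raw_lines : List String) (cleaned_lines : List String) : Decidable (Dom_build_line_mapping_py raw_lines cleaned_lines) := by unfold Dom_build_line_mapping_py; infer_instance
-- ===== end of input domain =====

-- B replaces A's nested resuming scan of raw_lines by a single pass over raw_lines with a
-- cursor into cleaned_lines, filling a preallocated zero list (simpler; same return value).


-- ===== PORT A =====
-- the inner `while raw_idx < len(raw_lines): …` loop: returns the index of the first
-- match at or after `i` (the `break` case), or none (the loop falls through).
def pvScanA (raw : List String) (s : String) (i : Nat) : Option Nat :=
  if h : i < raw.length then
    if raw[i] = s then some i else pvScanA raw s (i + 1)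
  else none
termination_by raw.length - i

-- the outer `for cleaned_line in cleaned_lines:` loop with state raw_idx;
-- on a break raw_idx becomes j+1, on fall-through it has reached len(raw_lines).
def pvLoopA (raw : List String) : List String → Nat → List Int
  | [], _ => []
  | c :: cs, r =>
    match pvScanA raw c r with
    | some j => ((j : Int) + 1) :: pvLoopA raw cs (j + 1)
    | none => 0 :: pvLoopA raw cs raw.length

def build_line_mapping_py (raw_lines : List String) (cleaned_lines : List String) : List Int :=
  pvLoopA raw_lines cleaned_lines 0

-- ===== PORT B =====
-- `for i, line in enumerate(raw_lines): if c < len(cleaned_lines) and line == cleaned_lines[c]: mapping[c] = i+1; c += 1`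
def build_line_mapping_py_alt (raw_lines : List String) (cleaned_lines : List String) : List Int :=
  let init : List Int := List.replicate cleaned_lines.length 0
  let res := (PySem.List.enumerate raw_lines).foldl
    (fun (st : List Int × Nat) p =>
      if h : st.2 < cleaned_lines.length then
        if p.2 = cleaned_lines[st.2] then (st.1.set st.2 (p.1 + 1), st.2 + 1) else st
      else st)
    (init, 0)
  res.1

-- ===== PRECONDITION & SPEC =====
def Spec_build_line_mapping_py (raw_lines : List String) (cleaned_lines : List String) (out : List Int) : Prop := out = build_line_mapping_py_alt raw_lines cleaned_lines
instance (raw_lines : List String) (cleaned_lines : List String) (out : List Int) : Decidable (Spec_build_line_mapping_py raw_lines cleaned_lines out) := by unfold Spec_build_line_mapping_py; infer_instance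

-- ===== CLAIM (what is proved, stated in full; the proofs are below) =====
def Claim_equal_build_line_mapping_py : Prop := ∀ (raw_lines : List String) (cleaned_lines : List String), Dom_build_line_mapping_py raw_lines cleaned_lines → Spec_build_line_mapping_py raw_lines cleaned_lines (build_line_mapping_py raw_lines cleaned_lines)

-- ===== LEMMAS AND PROOFS =====

-- reference function: greedy match of `cs` against the raw suffix `xs`, whose first
-- element has (0-based) raw index `i`; a miss zeroes the whole remainder.
def pvGreedy : List String → Int → List String → List Int
  | _, _, [] => []
  | [], _, _ :: cs => List.replicate (cs.length + 1) 0
  | x :: xs, i, c :: cs =>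
    if x = c then (i + 1) :: pvGreedy xs (i + 1) cs else pvGreedy xs (i + 1) (c :: cs)

lemma pvGreedy_nil (i : Int) (cs : List String) :
    pvGreedy [] i cs = List.replicate cs.length 0 := by
  cases cs <;> simp [pvGreedy]

-- A's loop from raw_idx = r computes the greedy match of the remaining suffix.
lemma pvLoopA_eq_greedy (raw : List String) (cs : List String) :
    ∀ r, pvLoopA raw cs r = pvGreedy (raw.drop r) (r : Int) cs := by
  induction cs with
  | nil => intro r; simp [pvLoopA, pvGreedy]
  | cons c cs ih =>
    -- inner induction on the fuel raw.length - r for the while-scan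
    have inner : ∀ k r, raw.length - r ≤ k →
        pvLoopA raw (c :: cs) r = pvGreedy (raw.drop r) (r : Int) (c :: cs) := by
      intro k
      induction k with
      | zero =>
        intro r hr
        have hge : raw.length ≤ r := by omega
        have hdrop : raw.drop r = [] := List.drop_eq_nil_of_le hge
        have hscan : pvScanA raw c r = none := by
          unfold pvScanA; simp [Nat.not_lt.mpr hge]
        simp only [pvLoopA, hscan, hdrop, ih, List.drop_length, pvGreedy_nil]
        simp [List.replicate_succ]
      | succ k ihk =>
        intro r hr
        by_cases h : r < raw.length
        · have hdrop : raw.drop r = raw[r] :: raw.drop (r + 1) :=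
            List.drop_eq_getElem_cons h
          by_cases he : raw[r] = c
          · have hscan : pvScanA raw c r = some r := by
              unfold pvScanA; simp [h, he]
            simp only [pvLoopA, hscan, hdrop, pvGreedy, if_pos he, ih]
            push_cast; ring_nf
          · have hscan : pvScanA raw c r = pvScanA raw c (r + 1) := by
              conv_lhs => unfold pvScanA
              simp [h, he]
            have hstep : pvLoopA raw (c :: cs) r = pvLoopA raw (c :: cs) (r + 1) := by
              simp only [pvLoopA, hscan]
            rw [hstep, ihk (r + 1) (by omega), hdrop]
            simp only [pvGreedy, if_neg he]
            push_cast; ring_nf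
        · have hge : raw.length ≤ r := by omega
          have hdrop : raw.drop r = [] := List.drop_eq_nil_of_le hge
          have hscan : pvScanA raw c r = none := by
            unfold pvScanA; simp [Nat.not_lt.mpr hge]
          simp only [pvLoopA, hscan, hdrop, ih, List.drop_length, pvGreedy_nil]
          simp [List.replicate_succ]
    intro r
    exact inner raw.length r (by omega)

-- B's fold invariant: if positions ≥ c of m are still 0, the fold over the enumerated
-- suffix returns the kept prefix of m followed by the greedy match of the rest.
lemma pvFoldB_invariant (cleaned : List String) (xs : List String) :
    ∀ (i : Int) (m : List Int) (c : Nat), c ≤ cleaned.length → m.length = cleaned.length →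
      m.drop c = List.replicate (cleaned.length - c) 0 →
      ((PySem.List.enumerate xs i).foldl
        (fun (st : List Int × Nat) p =>
          if h : st.2 < cleaned.length then
            if p.2 = cleaned[st.2] then (st.1.set st.2 (p.1 + 1), st.2 + 1) else st
          else st)
        (m, c)).1 = m.take c ++ pvGreedy xs i (cleaned.drop c) := by
  induction xs with
  | nil =>
    intro i m c hc hm hz
    have : pvGreedy ([] : List String) i (cleaned.drop c) = List.replicate (cleaned.length - c) 0 := by
      rw [pvGreedy_nil, List.length_drop]
    rw [PySem.List.enumerate_nil, List.foldl_nil, this, ← hz, List.take_append_drop]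
  | cons x xs ihx =>
    intro i m c hc hm hz
    rw [PySem.List.enumerate_cons, List.foldl_cons]
    by_cases h : c < cleaned.length
    · have hdropc : cleaned.drop c = cleaned[c] :: cleaned.drop (c + 1) :=
        List.drop_eq_getElem_cons h
      by_cases he : x = cleaned[c]
      · simp only [dif_pos h, if_pos he]
        have hmc : c < m.length := by omega
        have hset := ihx (i + 1) (m.set c (i + 1)) (c + 1) (by omega) (by simpa using hm)
          (by
            rw [List.drop_set_of_lt (by omega : c < c + 1)]
            rw [← List.drop_drop, hz, List.drop_replicate, Nat.sub_sub])
        rw [hset, hdropc, pvGreedy, if_pos he]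
        -- m.set c v |>.take (c+1) = m.take c ++ [v]
        have hlen : (m.take c).length = c := by
          simp [Nat.min_eq_left (le_of_lt hmc)]
        have htake : (m.set c (i + 1)).take (c + 1) = m.take c ++ [i + 1] := by
          rw [List.take_set, List.take_succ_eq_append_getElem hmc, List.set_append]
          rw [hlen, if_neg (by omega : ¬ c < c), Nat.sub_self]
          rfl
        rw [htake]
        simp
      · simp only [dif_pos h, if_neg he]
        rw [ihx (i + 1) m c hc hm hz, hdropc, pvGreedy, if_neg he, ← hdropc]
    · have hce : c = cleaned.length := by omega
      have hdropc : cleaned.drop c = [] := by rw [hce, List.drop_length]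
      simp only [dif_neg h]
      rw [ihx (i + 1) m c hc hm hz, hdropc, pvGreedy, pvGreedy]

-- ===== VERDICT (by name: the statement is the Claim_ definition above) =====
theorem build_line_mapping_py_spec : Claim_equal_build_line_mapping_py := by
  intro raw cleaned _
  unfold Spec_build_line_mapping_py build_line_mapping_py build_line_mapping_py_alt
  rw [pvLoopA_eq_greedy]
  rw [pvFoldB_invariant cleaned raw 0 (List.replicate cleaned.length 0) 0 (by omega)
    (by simp) (by simp)]
  simp
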